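-- pv_equiv track=rewrite | github.com/maido-39/MiniGrid-LaC | src/dev-action_uncertainty/vlm_action_uncertainty_estim.py | _check_action_equivalence
-- ===== SOURCE A (Python) =====
-- def _check_action_equivalence(action1: str, action2: str) -> bool:
--     """
--     두 action이 의미적으로 동일한지 확인
--
--     Args:
--         action1: 첫 번째 action 문자열
--         action2: 두 번째 action 문자열
--
--     Returns:
--         의미적으로 동일하면 True, 다르면 False
--     """
--     # 정규화: 소문자 변환 및 공백 제거
--     a1 = action1.strip().lower()
--     a2 = action2.strip().lower()
--
--     # 완전히 동일하면 True
--     if a1 == a2: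
--         return True
--
--     # 동의어 매핑 (예: "up" = "north", "forward" = "up" 등)
--     synonyms = {
--         'up': ['north', 'forward', '↑'],
--         'down': ['south', 'backward', '↓'],
--         'left': ['west', '←'],
--         'right': ['east', '→'],
--         'pickup': ['pick', 'grab', 'take'],
--         'drop': ['put', 'place'],
--         'toggle': ['interact', 'activate']
--     }
--
--     # 동의어 체크
--     for key, values in synonyms.items():
--         if a1 == key and a2 in values:
--             return True
--         if a2 == key and a1 in values:
--             return True
--         if a1 in values and a2 in values:
--             return True
--
--     # 간단한 문자열 유사도 체크 (Levenshtein distance 기반)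
--     # 매우 짧은 action의 경우 완전 일치만 허용
--     if len(a1) <= 3 and len(a2) <= 3:
--         return False
--
--     # VLM을 사용한 의미적 동등성 체크 (선택적, 비용이 있음)
--     # 여기서는 간단한 휴리스틱만 사용
--     return False
-- ===== SOURCE B (Python) =====
-- def _check_action_equivalence(action1: str, action2: str) -> bool:
--     # Reverse-lookup table: every token (key or synonym) -> its group id (the key).
--     synonyms = {
--         'up': ['north', 'forward', '\u2191'],
--         'down': ['south', 'backward', '\u2193'],
--         'left': ['west', '\u2190'],
--         'right': ['east', '\u2192'],
--         'pickup': ['pick', 'grab', 'take'],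
--         'drop': ['put', 'place'],
--         'toggle': ['interact', 'activate']
--     }
--     token_to_group = {}
--     for key, values in synonyms.items():
--         token_to_group[key] = key
--         for v in values:
--             token_to_group[v] = key
--     a1 = action1.strip().lower()
--     a2 = action2.strip().lower()
--     if a1 == a2:
--         return True
--     return a1 in token_to_group and a2 in token_to_group \
--         and token_to_group[a1] == token_to_group[a2]
-- ===== Notes on version B (the rewrite author's own statement) =====
-- stated objective: simpler
-- what changed: Replaces the three-way scan over the synonym groups by a reverse-lookup dict token->group built once, compares the two group ids, and drops the dead length/VLM tail whose branches both return False.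
import Mathlib
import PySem

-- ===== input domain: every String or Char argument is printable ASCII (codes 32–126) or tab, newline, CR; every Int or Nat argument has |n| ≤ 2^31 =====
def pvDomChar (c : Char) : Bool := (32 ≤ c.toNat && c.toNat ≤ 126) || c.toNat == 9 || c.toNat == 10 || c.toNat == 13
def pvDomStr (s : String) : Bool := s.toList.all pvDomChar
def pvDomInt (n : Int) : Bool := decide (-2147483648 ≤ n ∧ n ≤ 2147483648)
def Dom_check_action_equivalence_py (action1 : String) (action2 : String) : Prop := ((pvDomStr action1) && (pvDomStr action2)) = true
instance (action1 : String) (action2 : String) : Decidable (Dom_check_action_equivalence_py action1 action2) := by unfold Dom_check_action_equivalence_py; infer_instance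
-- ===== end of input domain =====

-- B replaces A's three-way scan over the synonym groups by a reverse-lookup table
-- token -> group id built once, and drops A's dead length/VLM tail (both branches return False).

-- ===== PORT A =====
-- the synonyms dict of A (shared literal data; both programs carry the same table)
def pvSynonyms : List (String × List String) :=
  [("up", ["north", "forward", "↑"]),
   ("down", ["south", "backward", "↓"]),
   ("left", ["west", "←"]),
   ("right", ["east", "→"]),
   ("pickup", ["pick", "grab", "take"]),
   ("drop", ["put", "place"]),
   ("toggle", ["interact", "activate"])]

-- A's `for key, values in synonyms.items()` loop with its three early returns
def pvSynLoop : List (String × List String) → String → String → Bool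
  | [], _, _ => false
  | (k, vs) :: rest, a1, a2 =>
    if a1 == k && vs.contains a2 then true
    else if a2 == k && vs.contains a1 then true
    else if vs.contains a1 && vs.contains a2 then true
    else pvSynLoop rest a1 a2

def check_action_equivalence_py (action1 : String) (action2 : String) : Bool :=
  let a1 := PySem.Str.lower (PySem.Str.strip action1)
  let a2 := PySem.Str.lower (PySem.Str.strip action2)
  if a1 == a2 then true
  else if pvSynLoop pvSynonyms a1 a2 then true
  else if PySem.Str.len a1 ≤ 3 && PySem.Str.len a2 ≤ 3 then false
  else false

-- ===== PORT B =====
-- Source B's one-pass build of token_to_group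
def pvTokenToGroup : PySem.Dict String String :=
  pvSynonyms.foldl
    (fun d kv => kv.2.foldl (fun d v => d.insert v kv.1) (d.insert kv.1 kv.1))
    PySem.Dict.empty

def check_action_equivalence_py_alt (action1 : String) (action2 : String) : Bool :=
  let a1 := PySem.Str.lower (PySem.Str.strip action1)
  let a2 := PySem.Str.lower (PySem.Str.strip action2)
  if a1 == a2 then true
  else
    -- `a1 in d and a2 in d and d[a1] == d[a2]`; the subscripts are guarded by the
    -- membership tests, so getD with a dummy default is exact on the reached path
    pvTokenToGroup.contains a1 && pvTokenToGroup.contains a2 &&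
      (pvTokenToGroup.getD a1 "" == pvTokenToGroup.getD a2 "")

-- ===== PRECONDITION & SPEC =====
def Spec_check_action_equivalence_py (action1 : String) (action2 : String) (out : Bool) : Prop := out = check_action_equivalence_py_alt action1 action2
instance (action1 : String) (action2 : String) (out : Bool) : Decidable (Spec_check_action_equivalence_py action1 action2 out) := by unfold Spec_check_action_equivalence_py; infer_instance

-- ===== CLAIM (what is proved, stated in full; the proofs are below) =====
def Claim_equal_check_action_equivalence_py : Prop := ∀ (action1 : String) (action2 : String), Dom_check_action_equivalence_py action1 action2 → Spec_check_action_equivalence_py action1 action2 (check_action_equivalence_py action1 action2)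

-- ===== LEMMAS AND PROOFS =====

-- every token appearing in the synonym table, in dict-build order
def pvTokens : List String :=
  ["up", "north", "forward", "↑", "down", "south", "backward", "↓",
   "left", "west", "←", "right", "east", "→",
   "pickup", "pick", "grab", "take", "drop", "put", "place",
   "toggle", "interact", "activate"]

theorem pvDict_eq : pvTokenToGroup = PySem.Dict.mk
    [("up", "up"), ("north", "up"), ("forward", "up"), ("↑", "up"),
     ("down", "down"), ("south", "down"), ("backward", "down"), ("↓", "down"),
     ("left", "left"), ("west", "left"), ("←", "left"),
     ("right", "right"), ("east", "right"), ("→", "right"),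
     ("pickup", "pickup"), ("pick", "pickup"), ("grab", "pickup"), ("take", "pickup"),
     ("drop", "drop"), ("put", "drop"), ("place", "drop"),
     ("toggle", "toggle"), ("interact", "toggle"), ("activate", "toggle")] := by
  decide

theorem pvSynLoop_false (x y : String) (syns : List (String × List String))
    (hk : ∀ p ∈ syns, ((x == p.1) = false ∧ p.2.contains x = false) ∨
                      ((y == p.1) = false ∧ p.2.contains y = false)) :
    pvSynLoop syns x y = false := by
  induction syns with
  | nil => rfl
  | cons p rest ih =>
    obtain ⟨k, vs⟩ := p
    rcases hk (k, vs) (List.mem_cons_self) with ⟨hx, hc⟩ | ⟨hy, hc⟩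
    · have hm : x ∉ vs := by simpa using hc
      simp [pvSynLoop, hx, hm, ih (fun q hq => hk q (List.mem_cons_of_mem _ hq))]
    · have hm : y ∉ vs := by simpa using hc
      simp [pvSynLoop, hy, hm, ih (fun q hq => hk q (List.mem_cons_of_mem _ hq))]

theorem pvNotMem_facts (x : String) (hx : x ∉ pvTokens) :
    ∀ p ∈ pvSynonyms, (x == p.1) = false ∧ p.2.contains x = false := by
  have h : ∀ t ∈ pvTokens, x ≠ t := fun t ht h => hx (h ▸ ht)
  simp only [pvTokens, List.mem_cons, List.not_mem_nil, or_false, forall_eq_or_imp,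
    forall_eq] at h
  obtain ⟨h1,h2,h3,h4,h5,h6,h7,h8,h9,h10,h11,h12,h13,h14,h15,h16,h17,h18,h19,h20,h21,h22,h23,h24⟩ := h
  intro p hp
  fin_cases hp <;>
    simp [h1,h2,h3,h4,h5,h6,h7,h8,h9,h10,h11,h12,
      h13,h14,h15,h16,h17,h18,h19,h20,h21,h22,h23,h24]

theorem pvContains_nonmem (x : String) (hx : x ∉ pvTokens) :
    pvTokenToGroup.contains x = false := by
  rw [pvDict_eq, PySem.Dict.contains_eq_decide_mem_keys]
  simp only [decide_eq_false_iff_not]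
  intro hmem
  apply hx
  revert hmem
  simp [PySem.Dict.keys, pvTokens]

theorem pvGrid : ∀ x ∈ pvTokens, ∀ y ∈ pvTokens, x ≠ y →
    pvSynLoop pvSynonyms x y =
      (pvTokenToGroup.contains x && pvTokenToGroup.contains y &&
        (pvTokenToGroup.getD x "" == pvTokenToGroup.getD y "")) := by
  decide

theorem pvMain (x y : String) (hne : x ≠ y) :
    pvSynLoop pvSynonyms x y =
      (pvTokenToGroup.contains x && pvTokenToGroup.contains y &&
        (pvTokenToGroup.getD x "" == pvTokenToGroup.getD y "")) := by
  by_cases hx : x ∈ pvTokens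
  · by_cases hy : y ∈ pvTokens
    · exact pvGrid x hx y hy hne
    · rw [pvSynLoop_false x y pvSynonyms (fun p hp => Or.inr (pvNotMem_facts y hy p hp)),
          pvContains_nonmem y hy]
      simp
  · rw [pvSynLoop_false x y pvSynonyms (fun p hp => Or.inl (pvNotMem_facts x hx p hp)),
        pvContains_nonmem x hx]
    simp

theorem pvBody (x y : String) :
    (if x == y then true
     else if pvSynLoop pvSynonyms x y then true
     else if PySem.Str.len x ≤ 3 && PySem.Str.len y ≤ 3 then false else false)
    = (if x == y then true
       else pvTokenToGroup.contains x && pvTokenToGroup.contains y &&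
         (pvTokenToGroup.getD x "" == pvTokenToGroup.getD y "")) := by
  by_cases h : x = y
  · simp [h]
  · have hbe : (x == y) = false := beq_eq_false_iff_ne.mpr h
    rw [hbe]
    simp only [Bool.false_eq_true, if_false]
    rw [pvMain x y h]
    cases hE : (pvTokenToGroup.contains x && pvTokenToGroup.contains y &&
        (pvTokenToGroup.getD x "" == pvTokenToGroup.getD y "")) <;> simp

-- ===== VERDICT (by name: the statement is the Claim_ definition above) =====
theorem check_action_equivalence_py_spec : Claim_equal_check_action_equivalence_py := by
  intro action1 action2 _
  unfold Spec_check_action_equivalence_py check_action_equivalence_py check_action_equivalence_py_alt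
  exact pvBody (PySem.Str.lower (PySem.Str.strip action1)) (PySem.Str.lower (PySem.Str.strip action2))
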